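-- pv_equiv track=rewrite | github.com/pjpscriv/advent-of-code-2020 | day_19/part_2.py | parse_messages
-- ===== SOURCE A (Python) =====
-- def parse_messages(lines):
--     messages = []
--     parsing_on = False
--     for line in lines:
--         line = line.strip()
--         if not parsing_on:
--             if line == '':
--                 parsing_on = True
--         else:
--             messages.append(line)
--     return messages
-- ===== SOURCE B (Python) =====
-- def parse_messages(lines):
--     stripped = [l.strip() for l in lines]
--     if '' not in stripped:
--         return []
--     return stripped[stripped.index('') + 1:]
-- ===== Notes on version B (the rewrite author's own statement) =====
-- stated objective: simpler
-- what changed: Replaces the parsing_on state-flag loop by stripping all lines once, locating the first blank line with list.index, and returning the slice after it.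
import Mathlib
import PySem

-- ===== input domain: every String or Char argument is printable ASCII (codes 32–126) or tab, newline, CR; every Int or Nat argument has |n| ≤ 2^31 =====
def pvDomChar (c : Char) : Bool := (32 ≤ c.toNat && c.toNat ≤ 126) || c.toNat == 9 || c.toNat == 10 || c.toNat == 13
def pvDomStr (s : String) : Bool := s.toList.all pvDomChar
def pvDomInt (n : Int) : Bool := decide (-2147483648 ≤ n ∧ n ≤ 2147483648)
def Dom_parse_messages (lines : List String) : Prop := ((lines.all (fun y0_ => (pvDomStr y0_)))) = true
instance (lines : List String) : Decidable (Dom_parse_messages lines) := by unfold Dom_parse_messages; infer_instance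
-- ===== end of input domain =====

-- B replaces A's parsing_on state-flag loop by stripping once, finding the first blank line and slicing after it (simpler decomposition).

-- ===== PORT A =====
-- loop body of A: state is (messages, parsing_on)
def pmStep (st : List String × Bool) (line : String) : List String × Bool :=
  let l := PySem.Str.strip line
  if st.2 = false then
    if l = "" then (st.1, true) else st
  else
    (st.1 ++ [l], st.2)

def parse_messages (lines : List String) : List String :=
  (lines.foldl pmStep ([], false)).1

-- ===== PORT B =====
def parse_messages_alt (lines : List String) : List String :=
  let stripped := lines.map PySem.Str.strip
  match PySem.List.index? stripped "" with
  | none => []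
  | some i => PySem.List.slice stripped (some ((i : Int) + 1)) none

-- ===== PRECONDITION & SPEC =====
def Spec_parse_messages (lines : List String) (out : List String) : Prop := out = parse_messages_alt lines
instance (lines : List String) (out : List String) : Decidable (Spec_parse_messages lines out) := by unfold Spec_parse_messages; infer_instance

-- ===== CLAIM (what is proved, stated in full; the proofs are below) =====
def Claim_equal_parse_messages : Prop := ∀ (lines : List String), Dom_parse_messages lines → Spec_parse_messages lines (parse_messages lines)

-- ===== LEMMAS AND PROOFS =====

-- once parsing_on is true, the loop just appends every stripped line
theorem pm_fold_true (lines : List String) (acc : List String) :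
    List.foldl pmStep (acc, true) lines = (acc ++ lines.map PySem.Str.strip, true) := by
  induction lines generalizing acc with
  | nil => simp
  | cons h t ih => simp [pmStep, ih]

-- B's slice after the found index is a drop
theorem alt_drop (lines : List String) (i : Nat)
    (h : PySem.List.index? (lines.map PySem.Str.strip) "" = some i) :
    parse_messages_alt lines = (lines.map PySem.Str.strip).drop (i + 1) := by
  simp only [parse_messages_alt, h]
  have : ((i : Int) + 1) = ((i + 1 : Nat) : Int) := by push_cast; ring
  rw [this, PySem.List.slice_from_natCast]

theorem pm_fold_false (lines : List String) (acc : List String) :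
    (List.foldl pmStep (acc, false) lines).1 = acc ++ parse_messages_alt lines := by
  induction lines generalizing acc with
  | nil => simp [parse_messages_alt, PySem.List.index?]
  | cons h t ih =>
    by_cases hb : PySem.Str.strip h = ""
    · have hidx : PySem.List.index? ((h :: t).map PySem.Str.strip) "" = some 0 := by
        simp only [List.map_cons, hb]
        exact PySem.List.index?_cons_self _ _
      rw [alt_drop _ 0 hidx]
      simp [pmStep, hb, pm_fold_true]
    · have hidx : PySem.List.index? ((h :: t).map PySem.Str.strip) ""
          = (PySem.List.index? (t.map PySem.Str.strip) "").map (· + 1) := by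
        simp only [List.map_cons]
        exact PySem.List.index?_cons_of_ne _ hb
      have hstep : List.foldl pmStep (acc, false) (h :: t)
          = List.foldl pmStep (acc, false) t := by
        simp [pmStep, hb]
      rw [hstep, ih]
      congr 1
      cases hti : PySem.List.index? (t.map PySem.Str.strip) "" with
      | none =>
        simp only [parse_messages_alt, hidx, hti, Option.map_none]
      | some i =>
        rw [alt_drop t i hti, alt_drop (h :: t) (i + 1) (by rw [hidx, hti]; rfl)]
        simp

-- ===== VERDICT (by name: the statement is the Claim_ definition above) =====
theorem parse_messages_spec : Claim_equal_parse_messages := by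
  intro lines _
  show parse_messages lines = parse_messages_alt lines
  simpa using pm_fold_false lines []
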